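-- pv_equiv track=rewrite | github.com/jano256/advent-of-code | year/2025/day03/b.py | find_big_pos
-- ===== SOURCE A (Python) =====
-- def find_big_pos(bank, start, stop):
--     for jolt in map(str, range(9, 0, -1)):
--         if (stop == 0):
--             i = bank[start:].find(jolt)
--         else:
--             i = bank[start:-stop].find(jolt)
--         if i >= 0:
--             return i
-- ===== SOURCE B (Python) =====
-- def find_big_pos(bank, start, stop):
--     s = bank[start:] if stop == 0 else bank[start:-stop]
--     best_index = None
--     best_digit = '0'
--     for i, c in enumerate(s):
--         if '1' <= c <= '9' and best_digit < c:
--             best_digit = c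
--             best_index = i
--     return best_index
-- ===== Notes on version B (the rewrite author's own statement) =====
-- stated objective: simpler
-- what changed: Replaces the 9 descending-digit .find passes over the slice with a single enumerate scan keeping the best digit char and its earliest index.
import Mathlib
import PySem

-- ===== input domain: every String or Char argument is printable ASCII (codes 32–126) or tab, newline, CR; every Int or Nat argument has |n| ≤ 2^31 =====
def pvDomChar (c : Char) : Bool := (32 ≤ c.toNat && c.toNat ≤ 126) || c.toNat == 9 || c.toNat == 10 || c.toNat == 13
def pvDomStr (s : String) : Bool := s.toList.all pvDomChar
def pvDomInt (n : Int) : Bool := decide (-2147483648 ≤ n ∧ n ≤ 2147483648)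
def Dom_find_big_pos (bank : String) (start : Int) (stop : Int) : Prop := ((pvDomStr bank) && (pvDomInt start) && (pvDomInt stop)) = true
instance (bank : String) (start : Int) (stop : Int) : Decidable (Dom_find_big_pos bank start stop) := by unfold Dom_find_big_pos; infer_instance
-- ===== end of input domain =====

-- B replaces A's nine descending-digit find-passes by one linear scan keeping the best digit and its earliest index (objective: simpler).

-- ===== PORT A =====
-- the 'for jolt in map(str, range(9, 0, -1))' loop body, step for step
def findA_loop (bank : String) (start : Int) (stop : Int) : List Int → Option Int
  | [] => none
  | jolt :: rest =>
    let i : Int :=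
      if stop = 0 then
        PySem.Str.find (PySem.Str.slice bank (some start) none) (PySem.Int.toStr jolt)
      else
        PySem.Str.find (PySem.Str.slice bank (some start) (some (-stop))) (PySem.Int.toStr jolt)
    if 0 ≤ i then some i else findA_loop bank start stop rest

def find_big_pos (bank : String) (start : Int) (stop : Int) : Option Int :=
  findA_loop bank start stop (PySem.List.pyRange 9 0 (-1))

-- ===== PORT B =====
def find_big_pos_alt (bank : String) (start : Int) (stop : Int) : Option Int :=
  let s : String :=
    if stop = 0 then PySem.Str.slice bank (some start) none
    else PySem.Str.slice bank (some start) (some (-stop))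
  let r : Option Int × Char :=
    (PySem.List.enumerate s.toList 0).foldl
      (fun acc ic =>
        if '1' ≤ ic.2 ∧ ic.2 ≤ '9' ∧ acc.2 < ic.2 then (some ic.1, ic.2) else acc)
      (none, '0')
  r.1

-- ===== PRECONDITION & SPEC =====
def Spec_find_big_pos (bank : String) (start : Int) (stop : Int) (out : Option Int) : Prop := out = find_big_pos_alt bank start stop
instance (bank : String) (start : Int) (stop : Int) (out : Option Int) : Decidable (Spec_find_big_pos bank start stop out) := by unfold Spec_find_big_pos; infer_instance

-- ===== CLAIM (what is proved, stated in full; the proofs are below) =====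
def Claim_equal_find_big_pos : Prop := ∀ (bank : String) (start : Int) (stop : Int), Dom_find_big_pos bank start stop → Spec_find_big_pos bank start stop (find_big_pos bank start stop)

-- ===== LEMMAS AND PROOFS =====

-- structural version of B's fold
def gg : List Char → Int → Option Int → Char → (Option Int × Char)
  | [], _, bi, bd => (bi, bd)
  | c :: t, s, bi, bd =>
    if '1' ≤ c ∧ c ≤ '9' ∧ bd < c then gg t (s + 1) (some s) c else gg t (s + 1) bi bd

theorem foldl_eq_gg (t : List Char) (s : Int) (bi : Option Int) (bd : Char) :
    (PySem.List.enumerate t s).foldl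
      (fun acc ic =>
        if '1' ≤ ic.2 ∧ ic.2 ≤ '9' ∧ acc.2 < ic.2 then (some ic.1, ic.2) else acc)
      (bi, bd) = gg t s bi bd := by
  induction t generalizing s bi bd with
  | nil => simp [PySem.List.enumerate_nil, gg]
  | cons c t ih =>
    rw [PySem.List.enumerate_cons]
    simp only [List.foldl_cons, gg]
    by_cases h : '1' ≤ c ∧ c ≤ '9' ∧ bd < c
    · simp [h, ih]
    · simp [h, ih]

theorem char_le_iff (a b : Char) : a ≤ b ↔ a.toNat ≤ b.toNat := by
  rw [Char.le_def, Char.toNat, Char.toNat, UInt32.le_iff_toNat_le]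

theorem char_lt_iff (a b : Char) : a < b ↔ a.toNat < b.toNat := by
  rw [Char.lt_def, Char.toNat, Char.toNat, UInt32.lt_iff_toNat_lt]

theorem gg_no_update (t : List Char) (s : Int) (bi : Option Int) (bd : Char)
    (h : ∀ c ∈ t, ¬('1' ≤ c ∧ c ≤ '9' ∧ bd < c)) : gg t s bi bd = (bi, bd) := by
  induction t generalizing s with
  | nil => rfl
  | cons c t ih =>
    have hc := h c (List.mem_cons_self ..)
    simp only [gg, if_neg hc]
    exact ih (s + 1) (fun c' hc' => h c' (List.mem_cons_of_mem _ hc'))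

theorem gg_max_found (cs : Char) (pre suf : List Char) (s : Int) (bi : Option Int) (bd : Char)
    (hdig : '1' ≤ cs ∧ cs ≤ '9') (hbd : bd < cs)
    (hle : ∀ c ∈ pre ++ cs :: suf, ('1' ≤ c ∧ c ≤ '9') → c ≤ cs)
    (hnp : cs ∉ pre) :
    (gg (pre ++ cs :: suf) s bi bd).1 = some (s + pre.length) := by
  induction pre generalizing s bi bd with
  | nil =>
    have hcond : '1' ≤ cs ∧ cs ≤ '9' ∧ bd < cs := ⟨hdig.1, hdig.2, hbd⟩
    simp only [List.nil_append, gg, if_pos hcond]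
    rw [gg_no_update]
    · simp
    · intro c hc hcd
      exact absurd (hle c (List.mem_cons_of_mem _ (by simpa using hc)) ⟨hcd.1, hcd.2.1⟩)
        (not_le.mpr hcd.2.2)
  | cons p pre ih =>
    have hpne : p ≠ cs := fun h => hnp (h ▸ List.mem_cons_self ..)
    have hle' : ∀ c ∈ pre ++ cs :: suf, ('1' ≤ c ∧ c ≤ '9') → c ≤ cs := by
      intro c hc; exact hle c (List.mem_cons_of_mem _ hc)
    have hnp' : cs ∉ pre := fun h => hnp (List.mem_cons_of_mem _ h)
    simp only [List.cons_append, gg]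
    by_cases hp : '1' ≤ p ∧ p ≤ '9' ∧ bd < p
    · have hplt : p < cs :=
        lt_of_le_of_ne (hle p (List.mem_cons_self ..) ⟨hp.1, hp.2.1⟩) hpne
      rw [if_pos hp, ih (s + 1) (some s) p hplt hle' hnp']
      simp only [List.length_cons]
      congr 1; push_cast; ring
    · rw [if_neg hp, ih (s + 1) bi bd hbd hle' hnp']
      simp only [List.length_cons]
      congr 1; push_cast; ring

-- A's loop on the digit characters, counted down
def AL (t : List Char) : Nat → Option Int
  | 0 => none
  | d + 1 =>
    let i := PySem.Chars.find t [Char.ofNat (48 + (d + 1))]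
    if 0 ≤ i then some i else AL t d

theorem singleton_infix_iff (c : Char) (t : List Char) : [c] <:+: t ↔ c ∈ t := by
  constructor
  · intro h; exact (List.singleton_sublist).mp h.sublist
  · intro h
    obtain ⟨l₁, l₂, rfl⟩ := List.mem_iff_append.mp h
    exact ⟨l₁, l₂, by simp⟩

theorem AL_eq_gg (t : List Char) (d : Nat) (hd : d ≤ 9)
    (hbound : ∀ c ∈ t, ('1' ≤ c ∧ c ≤ '9') → c.toNat ≤ 48 + d) :
    AL t d = (gg t 0 none '0').1 := by
  induction d with
  | zero =>
    rw [gg_no_update]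
    · rfl
    · intro c hc hcon
      have h1 : 49 ≤ c.toNat := by
        have := (char_le_iff '1' c).mp hcon.1
        have h1' : ('1' : Char).toNat = 49 := rfl
        omega
      have := hbound c hc ⟨hcon.1, hcon.2.1⟩
      omega
  | succ d ih =>
    set cs : Char := Char.ofNat (48 + (d + 1)) with hcs
    have hval : Nat.isValidChar (48 + (d + 1)) := Or.inl (by omega)
    have hcsval : cs.toNat = 48 + (d + 1) := by
      rw [hcs, Char.toNat_ofNat, if_pos hval]
    have hdig : '1' ≤ cs ∧ cs ≤ '9' := by
      rw [char_le_iff, char_le_iff]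
      have h1 : ('1' : Char).toNat = 49 := rfl
      have h9 : ('9' : Char).toNat = 57 := rfl
      omega
    simp only [AL]
    by_cases hfind : 0 ≤ PySem.Chars.find t [cs]
    · rw [if_pos hfind]
      have hne : PySem.Chars.find t [cs] ≠ -1 := by omega
      have hne' : PySem.Chars.findFrom t [cs] 0 none ≠ -1 := by
        rwa [PySem.Chars.findFrom_zero]
      have hspec := PySem.Chars.findFrom_natCast_spec t [cs] 0 (by omega) (by
        simpa using hne')
      simp only [Nat.cast_zero, PySem.Chars.findFrom_zero] at hspec
      obtain ⟨-, hpref, hmin⟩ := hspec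
      set j : Nat := (PySem.Chars.find t [cs]).toNat with hj
      obtain ⟨rest, hrest⟩ := hpref
      have hjlen : j < t.length := by
        by_contra hge
        have : t.drop j = [] := List.drop_eq_nil_of_le (by omega)
        rw [this] at hrest; simp at hrest
    -- t = take j ++ cs :: rest
      have hdecomp : t = t.take j ++ cs :: rest := by
        conv_lhs => rw [← List.take_append_drop j t]
        rw [← hrest]; rfl
      have hnp : cs ∉ t.take j := by
        intro hmem
        obtain ⟨k, hk, hkc⟩ := List.getElem_of_mem hmem
        have hkj : k < j := by
          have := List.length_take_le j t; omega
        apply hmin k (by omega) (by omega)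
        have : t.drop k = cs :: t.drop (k + 1) := by
          rw [List.drop_eq_getElem_cons (by omega)]
          congr 1
          rw [← hkc, List.getElem_take]
        rw [this]; simp
      have hle : ∀ c ∈ t, ('1' ≤ c ∧ c ≤ '9') → c ≤ cs := by
        intro c hc hcd
        have := hbound c hc hcd
        rw [char_le_iff]
        omega
      have hgg : (gg t 0 none '0').1 = some ((0 : Int) + (t.take j).length) := by
        conv_lhs => rw [hdecomp]
        exact gg_max_found cs (t.take j) rest 0 none '0' hdig
          (by rw [char_lt_iff]; have h0 : ('0' : Char).toNat = 48 := rfl; omega)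
          (hdecomp ▸ hle) hnp
      have hlen : (t.take j).length = j := List.length_take_of_le (by omega)
      rw [hgg, hlen]
      simp only [zero_add]
      congr 1
      rw [← hcs]
      omega
    · rw [if_neg hfind]
      have hne : PySem.Chars.find t [cs] = -1 := by
        have := PySem.Chars.neg_one_le_find t [cs]; omega
      have hnotin : cs ∉ t := by
        intro hmem
        exact (PySem.Chars.find_eq_neg_one_iff t [cs]).mp hne
          ((singleton_infix_iff cs t).mpr hmem)
      apply ih (by omega)
      intro c hc hcd
      have hb := hbound c hc hcd
      by_cases hceq : c.toNat = 48 + (d + 1)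
      · exfalso
        apply hnotin
        have hceq2 : c = cs := by
          have h1 : c.toNat = cs.toNat := by omega
          have := (char_le_iff c cs).mpr (le_of_eq h1)
          have := (char_le_iff cs c).mpr (le_of_eq h1.symm)
          exact le_antisymm ‹c ≤ cs› ‹cs ≤ c›
        rwa [← hceq2]
      · omega

theorem find_big_pos_eq_AL (bank : String) (start : Int) (stop : Int) :
    find_big_pos bank start stop =
      AL (if stop = 0 then (PySem.Str.slice bank (some start) none).toList
          else (PySem.Str.slice bank (some start) (some (-stop))).toList) 9 := by
  have hrange : PySem.List.pyRange 9 0 (-1) = [9, 8, 7, 6, 5, 4, 3, 2, 1] := by decide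
  by_cases hs : stop = 0 <;>
    simp only [find_big_pos, hrange, findA_loop, AL, hs, if_true, if_false,
      PySem.Str.find_eq] <;>
    norm_num [show (PySem.Int.toStr 9).toList = ['9'] from rfl,
      show (PySem.Int.toStr 8).toList = ['8'] from rfl,
      show (PySem.Int.toStr 7).toList = ['7'] from rfl,
      show (PySem.Int.toStr 6).toList = ['6'] from rfl,
      show (PySem.Int.toStr 5).toList = ['5'] from rfl,
      show (PySem.Int.toStr 4).toList = ['4'] from rfl,
      show (PySem.Int.toStr 3).toList = ['3'] from rfl,
      show (PySem.Int.toStr 2).toList = ['2'] from rfl,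
      show (PySem.Int.toStr 1).toList = ['1'] from rfl,
      show Char.ofNat 57 = '9' from rfl, show Char.ofNat 56 = '8' from rfl,
      show Char.ofNat 55 = '7' from rfl, show Char.ofNat 54 = '6' from rfl,
      show Char.ofNat 53 = '5' from rfl, show Char.ofNat 52 = '4' from rfl,
      show Char.ofNat 51 = '3' from rfl, show Char.ofNat 50 = '2' from rfl,
      show Char.ofNat 49 = '1' from rfl]

theorem char_le_nine_toNat {c : Char} (h : c ≤ '9') : c.toNat ≤ 57 := by
  have := (char_le_iff c '9').mp h
  have h9 : ('9' : Char).toNat = 57 := rfl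
  omega

-- ===== VERDICT (by name: the statement is the Claim_ definition above) =====
theorem find_big_pos_spec : Claim_equal_find_big_pos := by
  intro bank start stop _
  unfold Spec_find_big_pos find_big_pos_alt
  rw [find_big_pos_eq_AL]
  by_cases hs : stop = 0 <;>
    simp only [hs, if_true, if_false] <;>
    · rw [foldl_eq_gg]
      exact AL_eq_gg _ 9 (by omega) (fun c _ hcd => char_le_nine_toNat hcd.2)
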